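-- pv_equiv track=rewrite | github.com/FAIRmat-NFDI/nomad-plugins-metadata | src/nomad_plugins_metadata/extractor/extract.py | _pyproject_authors
-- ===== SOURCE A (Python) =====
-- def _pyproject_authors(project: dict) -> list[dict]:
--     authors = []
--     for item in project.get('authors', []) or []:
--         name = item.get('name')
--         email = item.get('email')
--         if not name and not email:
--             continue
--         authors.append({'name': name or '', 'email': email or ''})
--     deduped = []
--     seen = set()
--     for entry in authors:
--         marker = (entry.get('name', ''), entry.get('email', ''))
--         if marker in seen:
--             continue
--         seen.add(marker)
--         deduped.append(entry)
--     return deduped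
-- ===== SOURCE B (Python) =====
-- def _pyproject_authors(project: dict) -> list[dict]:
--     def go(items):
--         if not items:
--             return []
--         item, rest = items[0], items[1:]
--         name = item.get('name') or ''
--         email = item.get('email') or ''
--         if not name and not email:
--             return go(rest)
--         marker = (name, email)
--         return [{'name': name, 'email': email}] + go(
--             [it for it in rest
--              if ((it.get('name') or ''), (it.get('email') or '')) != marker])
--     return go(list(project.get('authors') or []))
-- ===== Notes on version B (the rewrite author's own statement) =====
-- stated objective: alternative
-- what changed: B replaces A's two sequential loops with a seen-set by a recursive decomposition with no auxiliary set at all: take the first valid author, then recurse on the remainder with all later items carrying the same (name, email) marker filtered out.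
import Mathlib
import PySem

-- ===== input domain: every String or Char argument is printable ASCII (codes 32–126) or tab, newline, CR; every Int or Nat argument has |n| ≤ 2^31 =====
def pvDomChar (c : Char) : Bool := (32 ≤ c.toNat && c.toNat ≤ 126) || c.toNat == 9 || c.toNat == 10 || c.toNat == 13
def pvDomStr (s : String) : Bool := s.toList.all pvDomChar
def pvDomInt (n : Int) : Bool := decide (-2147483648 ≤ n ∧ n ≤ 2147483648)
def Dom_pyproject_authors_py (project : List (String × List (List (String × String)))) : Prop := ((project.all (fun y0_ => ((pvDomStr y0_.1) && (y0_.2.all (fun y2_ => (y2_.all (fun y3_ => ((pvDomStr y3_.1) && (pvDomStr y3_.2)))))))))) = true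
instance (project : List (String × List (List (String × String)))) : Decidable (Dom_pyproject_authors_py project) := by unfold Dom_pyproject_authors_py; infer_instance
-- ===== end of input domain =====

-- B replaces A's two loops and seen-set by a recursive decomposition with no auxiliary set:
-- take the first valid author, filter its duplicates out of the remainder, recurse
-- (objective: alternative; the return value is the same everywhere).

-- ===== PORT A =====
-- `x or ''` on an Optional[str]
def pvOrEmpty (o : Option String) : String :=
  match o with
  | none => ""
  | some s => if s = "" then "" else s

-- `not x` on an Optional[str]
def pvFalsy (o : Option String) : Bool :=
  match o with
  | none => true
  | some s => s = ""

-- body of A's first loop: name = item.get('name'); email = item.get('email');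
-- if not name and not email: continue; authors.append({'name': name or '', 'email': email or ''})
def pvBuildStep (acc : List (List (String × String))) (item : List (String × String)) :
    List (List (String × String)) :=
  if pvFalsy ((PySem.Dict.mk item).get? "name") && pvFalsy ((PySem.Dict.mk item).get? "email") then
    acc
  else
    acc ++ [[("name", pvOrEmpty ((PySem.Dict.mk item).get? "name")),
             ("email", pvOrEmpty ((PySem.Dict.mk item).get? "email"))]]

-- body of A's second loop, state = (deduped, seen):
-- marker = (entry.get('name', ''), entry.get('email', '')); if marker in seen: continue; …
def pvDedupStep (st : List (List (String × String)) × PySem.Set (String × String))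
    (entry : List (String × String)) :
    List (List (String × String)) × PySem.Set (String × String) :=
  if PySem.Set.contains st.2 ((PySem.Dict.mk entry).getD "name" "", (PySem.Dict.mk entry).getD "email" "") then
    st
  else
    (st.1 ++ [entry],
     PySem.Set.add st.2 ((PySem.Dict.mk entry).getD "name" "", (PySem.Dict.mk entry).getD "email" ""))

def pyproject_authors_py (project : List (String × List (List (String × String)))) : List (List (String × String)) :=
  let got := (PySem.Dict.mk project).getD "authors" []   -- project.get('authors', [])
  let items := if got = [] then [] else got              -- `... or []`
  let authors := items.foldl pvBuildStep []
  (authors.foldl pvDedupStep ([], PySem.Set.empty)).1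

-- ===== PORT B =====
-- ((it.get('name') or ''), (it.get('email') or ''))
def pvMarker (item : List (String × String)) : String × String :=
  (pvOrEmpty ((PySem.Dict.mk item).get? "name"), pvOrEmpty ((PySem.Dict.mk item).get? "email"))

-- B's inner recursive `go`: first valid author, then recurse on the remainder with
-- later items carrying the same marker filtered out
def pvGo : List (List (String × String)) → List (List (String × String))
  | [] => []
  | item :: rest =>
    if pvOrEmpty ((PySem.Dict.mk item).get? "name") = "" ∧
       pvOrEmpty ((PySem.Dict.mk item).get? "email") = "" then
      pvGo rest
    else
      [("name", pvOrEmpty ((PySem.Dict.mk item).get? "name")),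
       ("email", pvOrEmpty ((PySem.Dict.mk item).get? "email"))] ::
      pvGo (rest.filter (fun it => decide (pvMarker it ≠ pvMarker item)))
termination_by items => items.length
decreasing_by
  · simp
  · simp only [List.length_unattach]
    exact Nat.lt_succ_of_le (le_trans (List.length_filter_le _ _) (by simp))

def pyproject_authors_py_alt (project : List (String × List (List (String × String)))) : List (List (String × String)) :=
  let items :=
    match (PySem.Dict.mk project).get? "authors" with    -- list(project.get('authors') or [])
    | none => []
    | some l => if l = [] then [] else l
  pvGo items

-- ===== PRECONDITION & SPEC =====
def Spec_pyproject_authors_py (project : List (String × List (List (String × String)))) (out : List (List (String × String))) : Prop := out = pyproject_authors_py_alt project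
instance (project : List (String × List (List (String × String)))) (out : List (List (String × String))) : Decidable (Spec_pyproject_authors_py project out) := by unfold Spec_pyproject_authors_py; infer_instance

-- ===== CLAIM (what is proved, stated in full; the proofs are below) =====
def Claim_equal_pyproject_authors_py : Prop := ∀ (project : List (String × List (List (String × String)))), Dom_pyproject_authors_py project → Spec_pyproject_authors_py project (pyproject_authors_py project)

-- ===== LEMMAS AND PROOFS =====

-- the dict entry with marker m
def pvEntryOf (m : String × String) : List (String × String) :=
  [("name", m.1), ("email", m.2)]

-- what A's first loop appends for one item ([] = skipped item)
def pvGA (item : List (String × String)) : List (List (String × String)) :=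
  if pvFalsy ((PySem.Dict.mk item).get? "name") && pvFalsy ((PySem.Dict.mk item).get? "email") then
    []
  else
    [pvEntryOf (pvMarker item)]

-- common specification: keep the first occurrence, filter duplicates out of the rest
def pwDedup : List (List (String × String)) → List (List (String × String))
  | [] => []
  | x :: xs => x :: pwDedup (xs.filter (fun y => decide (y ≠ x)))
termination_by l => l.length
decreasing_by
  simp only [List.length_unattach]
  exact Nat.lt_succ_of_le (le_trans (List.length_filter_le _ _) (by simp))

theorem pwDedup_nil : pwDedup [] = [] := by simp only [pwDedup]

theorem pwDedup_cons (x : List (String × String)) (xs : List (List (String × String))) :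
    pwDedup (x :: xs) = x :: pwDedup (xs.filter (fun y => decide (y ≠ x))) := by
  simp only [pwDedup]

theorem pvFalsy_iff (o : Option String) : pvFalsy o = true ↔ pvOrEmpty o = "" := by
  cases o with
  | none => simp [pvFalsy, pvOrEmpty]
  | some s => by_cases hs : s = "" <;> simp [pvFalsy, pvOrEmpty, hs]

theorem pvEntryOf_inj {m m' : String × String} (h : pvEntryOf m = pvEntryOf m') : m = m' := by
  simpa [pvEntryOf, Prod.ext_iff] using h

theorem pvGA_cond (item : List (String × String)) :
    (pvFalsy ((PySem.Dict.mk item).get? "name") &&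
      pvFalsy ((PySem.Dict.mk item).get? "email")) = true ↔ pvMarker item = ("", "") := by
  simp [Bool.and_eq_true, pvFalsy_iff, pvMarker, Prod.ext_iff]

theorem pvGA_eq (item : List (String × String)) :
    pvGA item = if pvMarker item = ("", "") then [] else [pvEntryOf (pvMarker item)] := by
  unfold pvGA
  by_cases h0 : pvMarker item = ("", "")
  · rw [if_pos ((pvGA_cond item).mpr h0), if_pos h0]
  · rw [if_neg (fun hc => h0 ((pvGA_cond item).mp hc)), if_neg h0]

theorem pvBuildStep_eq (acc : List (List (String × String))) (item : List (String × String)) :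
    pvBuildStep acc item = acc ++ pvGA item := by
  unfold pvBuildStep pvGA pvEntryOf pvMarker
  split <;> simp

theorem build_eq_flatMap (items : List (List (String × String)))
    (acc : List (List (String × String))) :
    items.foldl pvBuildStep acc = acc ++ items.flatMap pvGA := by
  induction items generalizing acc with
  | nil => simp
  | cons item rest ih => simp [List.foldl_cons, pvBuildStep_eq, ih]

theorem pvContains_add (s : PySem.Set (String × String)) (x y : String × String) :
    PySem.Set.contains (PySem.Set.add s x) y = true ↔
      (PySem.Set.contains s y = true ∨ y = x) := by
  simp [PySem.Set.contains, PySem.Set.mem_add]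

theorem pvDedupStep_entry (st : List (List (String × String)) × PySem.Set (String × String))
    (m : String × String) :
    pvDedupStep st (pvEntryOf m) =
      if PySem.Set.contains st.2 m then st
      else (st.1 ++ [pvEntryOf m], PySem.Set.add st.2 m) := by
  simp [pvDedupStep, pvEntryOf, PySem.Dict.getD, PySem.Dict.get?]

-- A's dedup loop computes pwDedup of the remaining not-yet-emitted entries,
-- under the invariant "seen is exactly the set of markers of the output so far"
theorem dedup_eq_pwDedup (l : List (List (String × String)))
    (acc : List (List (String × String))) (seen : PySem.Set (String × String))
    (hshape : ∀ x ∈ l, ∃ m : String × String, x = pvEntryOf m)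
    (hinv : ∀ m : String × String, PySem.Set.contains seen m = true ↔ pvEntryOf m ∈ acc) :
    (l.foldl pvDedupStep (acc, seen)).1 =
      acc ++ pwDedup (l.filter (fun y => decide (y ∉ acc))) := by
  induction l generalizing acc seen with
  | nil => simp [pwDedup_nil]
  | cons x xs ih =>
    obtain ⟨m, rfl⟩ := hshape x (by simp)
    simp only [List.foldl_cons, pvDedupStep_entry]
    by_cases hmem : pvEntryOf m ∈ acc
    · rw [if_pos ((hinv m).mpr hmem)]
      rw [List.filter_cons_of_neg (by simpa using hmem)]
      exact ih acc seen (fun x hx => hshape x (by simp [hx])) hinv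
    · rw [if_neg (by intro h; exact hmem ((hinv m).mp h))]
      rw [List.filter_cons_of_pos (by simpa using hmem)]
      have ih' := ih (acc ++ [pvEntryOf m]) (PySem.Set.add seen m)
        (fun x hx => hshape x (by simp [hx]))
        (by
          intro m'
          rw [pvContains_add, hinv m']
          simp only [List.mem_append, List.mem_singleton]
          constructor
          · rintro (h | rfl)
            · exact Or.inl h
            · exact Or.inr rfl
          · rintro (h | h)
            · exact Or.inl h
            · exact Or.inr (pvEntryOf_inj h))
      rw [ih']
      have hfil : xs.filter (fun y => decide (y ∉ acc ++ [pvEntryOf m])) =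
          (xs.filter (fun y => decide (y ∉ acc))).filter (fun y => decide (y ≠ pvEntryOf m)) := by
        rw [List.filter_filter]
        apply List.filter_congr
        intro y _
        by_cases h1 : y ∈ acc <;> by_cases h2 : y = pvEntryOf m <;> simp [h1, h2]
      rw [hfil, pwDedup_cons]
      simp

-- flatMap pvGA commutes with B's marker filter (the filtered-away items are exactly
-- those contributing the duplicate entry; skipped items contribute nothing either way)
theorem flatMap_filter (rest : List (List (String × String))) (m : String × String)
    (hm : m ≠ ("", "")) :
    (rest.filter (fun it => decide (pvMarker it ≠ m))).flatMap pvGA =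
      (rest.flatMap pvGA).filter (fun y => decide (y ≠ pvEntryOf m)) := by
  induction rest with
  | nil => simp
  | cons it rest ih =>
    by_cases h0 : pvMarker it = ("", "")
    · have hne : pvMarker it ≠ m := by rw [h0]; exact fun h => hm h.symm
      rw [List.filter_cons_of_pos (by simpa using hne)]
      simp only [List.flatMap_cons, pvGA_eq, if_pos h0]
      simpa using ih
    · by_cases hne : pvMarker it = m
      · rw [List.filter_cons_of_neg (by simpa using hne)]
        simp only [List.flatMap_cons, pvGA_eq, if_neg h0, List.singleton_append]
        rw [List.filter_cons_of_neg (by simp [hne])]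
        exact ih
      · rw [List.filter_cons_of_pos (by simpa using hne)]
        simp only [List.flatMap_cons, pvGA_eq, if_neg h0, List.singleton_append]
        rw [List.filter_cons_of_pos
          (by simp; intro h; exact hne (pvEntryOf_inj h))]
        rw [ih]

-- B's recursion computes pwDedup of A's built entry list
theorem pvMarker_trivial (item : List (String × String)) :
    pvMarker item = ("", "") ↔
      (pvOrEmpty ((PySem.Dict.mk item).get? "name") = "" ∧
       pvOrEmpty ((PySem.Dict.mk item).get? "email") = "") := by
  simp [pvMarker, Prod.ext_iff]

theorem go_eq_pwDedup : ∀ (items : List (List (String × String))),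
    pvGo items = pwDedup (items.flatMap pvGA)
  | [] => by simp [pvGo, pwDedup_nil]
  | item :: rest => by
    by_cases h : pvOrEmpty ((PySem.Dict.mk item).get? "name") = "" ∧
        pvOrEmpty ((PySem.Dict.mk item).get? "email") = ""
    · rw [pvGo, if_pos h]
      have h0 : pvMarker item = ("", "") := (pvMarker_trivial item).mpr h
      simp only [List.flatMap_cons, pvGA_eq, if_pos h0, List.nil_append]
      exact go_eq_pwDedup rest
    · rw [pvGo, if_neg h]
      have h0 : pvMarker item ≠ ("", "") := fun hc => h ((pvMarker_trivial item).mp hc)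
      simp only [List.flatMap_cons, pvGA_eq, if_neg h0, List.singleton_append]
      rw [pwDedup_cons, ← flatMap_filter rest (pvMarker item) h0]
      exact congrArg _
        (go_eq_pwDedup (rest.filter (fun it => decide (pvMarker it ≠ pvMarker item))))
termination_by items => items.length
decreasing_by
  · simp
  · exact Nat.lt_succ_of_le (List.length_filter_le _ _)

-- the same "authors or []" source list in both ports
theorem items_eq (project : List (String × List (List (String × String)))) :
    (if (PySem.Dict.mk project).getD "authors" [] = [] then []
     else (PySem.Dict.mk project).getD "authors" []) =
    (match (PySem.Dict.mk project).get? "authors" with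
     | none => []
     | some l => if l = [] then [] else l) := by
  cases h : (PySem.Dict.mk project).get? "authors" <;> simp [PySem.Dict.getD, h]

-- ===== VERDICT (by name: the statement is the Claim_ definition above) =====
theorem pyproject_authors_py_spec : Claim_equal_pyproject_authors_py := by
  intro project _hdom
  unfold Spec_pyproject_authors_py pyproject_authors_py pyproject_authors_py_alt
  show (List.foldl pvDedupStep ([], PySem.Set.empty)
          (List.foldl pvBuildStep []
            (if (PySem.Dict.mk project).getD "authors" [] = [] then []
             else (PySem.Dict.mk project).getD "authors" []))).1 =
      pvGo (match (PySem.Dict.mk project).get? "authors" with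
            | none => []
            | some l => if l = [] then [] else l)
  rw [← items_eq]
  set items := (if (PySem.Dict.mk project).getD "authors" [] = [] then []
     else (PySem.Dict.mk project).getD "authors" []) with hitems
  rw [build_eq_flatMap, List.nil_append, go_eq_pwDedup]
  have := dedup_eq_pwDedup (items.flatMap pvGA) [] PySem.Set.empty
    (by
      intro x hx
      rcases List.mem_flatMap.mp hx with ⟨it, _, hx⟩
      rw [pvGA_eq] at hx
      split at hx
      · cases hx
      · exact ⟨pvMarker it, by simpa using hx⟩)
    (by simp [PySem.Set.contains, PySem.Set.empty])
  simpa using this
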